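-- pv_equiv track=rewrite | github.com/pha123661/NYCU-2021Fall-Elementary_Graph_Theory | HW6-0711239/HW6-1-0711239.py | ifK5
-- ===== SOURCE A (Python) =====
-- from itertools import combinations
--
-- def ifK5(graph):
--     n = len(graph)
--     for points in combinations(range(n), 5):
--         flag = True
--         for u,v in combinations(points, 2):
--             if graph[u][v] == 0:
--                 flag = False
--                 break
--         if flag:
--             return True
--     return False
-- ===== SOURCE B (Python) =====
-- def ifK5(graph):
--     n = len(graph)
--     if n < 5:
--         return False
--     cache = {}
--
--     def nbr(u):
--         # forward-neighbour set {v > u : graph[u][v] != 0}, computed lazily, memoized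
--         s = cache.get(u)
--         if s is None:
--             s = {v for v in range(u + 1, n) if graph[u][v] != 0}
--             cache[u] = s
--         return s
--
--     def extend(cand, k):
--         if k == 0:
--             return True
--         for v in cand:
--             if extend(cand & nbr(v), k - 1):
--                 return True
--         return False
--
--     return any(extend(nbr(u), 4) for u in range(n))
-- ===== Notes on version B (the rewrite author's own statement) =====
-- stated objective: alternative
-- what changed: A tests every C(n,5) index combination against all 10 pairs; B grows cliques by recursive candidate-set intersection over lazily-memoized forward-neighbour sets (cand & nbr(v)) with early exit, pruning the search to actually-connected extensions.
-- outside the precondition, e.g. on ifK5([[8, 5, 0], [5, 0, 5], [0, 0, 7], [8, 8, 0], [6, 8, 8]]): A returns False, B raises IndexError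
import Mathlib
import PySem

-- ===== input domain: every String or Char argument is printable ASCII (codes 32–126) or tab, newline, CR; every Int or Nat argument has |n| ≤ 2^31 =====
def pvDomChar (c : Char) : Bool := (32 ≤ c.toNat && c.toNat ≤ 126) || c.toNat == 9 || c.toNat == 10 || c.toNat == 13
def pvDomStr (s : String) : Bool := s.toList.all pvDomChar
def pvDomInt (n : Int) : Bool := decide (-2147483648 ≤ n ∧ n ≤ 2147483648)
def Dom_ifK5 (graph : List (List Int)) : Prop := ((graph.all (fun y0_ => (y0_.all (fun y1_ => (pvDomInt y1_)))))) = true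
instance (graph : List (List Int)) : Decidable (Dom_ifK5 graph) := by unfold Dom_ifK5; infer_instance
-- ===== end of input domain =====

-- B replaces A's scan of all C(n,5) index 5-tuples by clique extension over lazily
-- memoized forward-neighbour sets with intersection pruning (objective: alternative).

-- ===== PORT A =====
-- for points in combinations(range(n),5): the inner flag/break loop over
-- combinations(points,2) is the .all below
def ifK5 (graph : List (List Int)) : Bool :=
  (PySem.List.combinations (PySem.List.pyRange 0 (graph.length : Int) 1) 5).any (fun points =>
    (PySem.List.combinations points 2).all (fun uv =>
      match uv with
      | [u, v] => !(PySem.List.pyGetD (PySem.List.pyGetD graph u []) v 0 == 0)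
      | _ => true))

-- ===== PORT B =====
-- def nbr(u): {v for v in range(u+1,n) if graph[u][v] != 0}; B memoizes these sets in a
-- dict cache, which is referentially transparent, so the port is the plain function
-- (the Python sets hold v-values from range(u+1,n), so distinct; ported as those lists)
def k5Nbr (graph : List (List Int)) (u : Int) : List Int :=
  (PySem.List.pyRange (u + 1) (graph.length : Int) 1).filter (fun v =>
    PySem.List.pyGetD (PySem.List.pyGetD graph u []) v 0 != 0)

-- def extend(cand, k): if k==0: True; any v in cand with extend(cand & nbr(v), k-1)
def k5Extend (graph : List (List Int)) : Nat → List Int → Bool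
  | 0, _ => true
  | k + 1, cand =>
      cand.any (fun v =>
        k5Extend graph k (cand.filter (fun x => (k5Nbr graph v).contains x)))

-- if n < 5: return False, then the any-loop over range(n)
def ifK5_alt (graph : List (List Int)) : Bool :=
  if graph.length < 5 then false else
  (PySem.List.pyRange 0 (graph.length : Int) 1).any (fun u =>
    k5Extend graph 4 (k5Nbr graph u))

-- ===== PRECONDITION & SPEC =====
-- Pre_ excludes ragged matrices with at least 5 rows: there Python A's graph[u][v]
-- can raise IndexError (and B indexes the same entries, eagerly); on some such inputs
-- A still returns by finding a clique before reaching a short row — excluded too (see cites).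
def Pre_ifK5 (graph : List (List Int)) : Prop :=
  graph.length < 5 ∨ ∀ row ∈ graph, graph.length ≤ row.length
instance (graph : List (List Int)) : Decidable (Pre_ifK5 graph) := by unfold Pre_ifK5; infer_instance

def pvWitness_ifK5 : List (List Int) :=
  [[0,1,1,1,1],[1,0,1,1,1],[1,1,0,1,1],[1,1,1,0,1],[1,1,1,1,0]]

def Spec_ifK5 (graph : List (List Int)) (out : Bool) : Prop := out = ifK5_alt graph
instance (graph : List (List Int)) (out : Bool) : Decidable (Spec_ifK5 graph out) := by unfold Spec_ifK5; infer_instance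

-- ===== CLAIM (what is proved, stated in full; the proofs are below) =====
def Claim_equal_ifK5 : Prop := ∀ (graph : List (List Int)), Dom_ifK5 graph → Pre_ifK5 graph → Spec_ifK5 graph (ifK5 graph)

-- ===== LEMMAS AND PROOFS =====

-- the entry test both ports make: graph[a][b] != 0 (with total defaults)
def k5E (graph : List (List Int)) (a b : Int) : Prop :=
  PySem.List.pyGetD (PySem.List.pyGetD graph a []) b 0 ≠ 0

-- canonical characterisation shared by both ports: an increasing in-range 5-list,
-- pairwise connected
def Clique5 (graph : List (List Int)) : Prop :=
  ∃ c : List Int, c.length = 5 ∧ (∀ x ∈ c, 0 ≤ x ∧ x < (graph.length : Int)) ∧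
    c.Pairwise (fun a b => a < b ∧ k5E graph a b)

theorem sublist_pyRange_of_sorted (c : List Int) (a b : Int)
    (h1 : c.Pairwise (· < ·)) (h2 : ∀ x ∈ c, a ≤ x ∧ x < b) :
    c.Sublist (PySem.List.pyRange a b 1) := by
  induction c generalizing a with
  | nil => exact List.nil_sublist _
  | cons x xs ih =>
    obtain ⟨hax, hxb⟩ := h2 x (List.mem_cons_self)
    have hxs : xs.Sublist (PySem.List.pyRange (x + 1) b 1) := by
      refine ih (x + 1) h1.of_cons (fun y hy => ?_)
      exact ⟨by have := (List.pairwise_cons.mp h1).1 y hy; omega, (h2 y (List.mem_cons_of_mem _ hy)).2⟩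
    have hsplit : PySem.List.pyRange a b 1
        = PySem.List.pyRange a x 1 ++ (x :: PySem.List.pyRange (x + 1) b 1) := by
      rw [PySem.List.pyRange_one_append a x b hax (by omega), PySem.List.pyRange_one_cons hxb]
    rw [hsplit]
    exact List.Sublist.trans (List.Sublist.cons₂ x hxs) (List.sublist_append_right _ _)

theorem inner_all_iff (graph : List (List Int)) (points : List Int) :
    ((PySem.List.combinations points 2).all (fun uv =>
      match uv with
      | [u, v] => !(PySem.List.pyGetD (PySem.List.pyGetD graph u []) v 0 == 0)
      | _ => true)) = true ↔ points.Pairwise (k5E graph) := by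
  rw [List.all_eq_true, List.pairwise_iff_forall_sublist]
  constructor
  · intro h a b hs
    have hm : [a, b] ∈ PySem.List.combinations points 2 :=
      (PySem.List.mem_combinations_iff points 2 [a,b]).mpr ⟨hs, rfl⟩
    have := h _ hm
    simpa [k5E] using this
  · intro h uv hm
    obtain ⟨hs, hl⟩ := (PySem.List.mem_combinations_iff points 2 uv).mp hm
    match uv, hl with
    | [a, b], _ =>
      have := h hs
      simpa [k5E] using this

theorem ifK5_iff_clique (graph : List (List Int)) :
    ifK5 graph = true ↔ Clique5 graph := by
  unfold ifK5 Clique5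
  rw [List.any_eq_true]
  constructor
  · rintro ⟨points, hmem, hall⟩
    obtain ⟨hs, hl⟩ := (PySem.List.mem_combinations_iff _ 5 points).mp hmem
    refine ⟨points, hl, ?_, ?_⟩
    · intro x hx
      have := hs.subset hx
      simpa [PySem.List.mem_pyRange_one] using this
    · have hlt : points.Pairwise (· < ·) :=
        (PySem.List.pairwise_lt_pyRange_one 0 (graph.length : Int)).sublist hs
      exact hlt.and ((inner_all_iff graph points).mp hall)
  · rintro ⟨c, hl, hbound, hpw⟩
    refine ⟨c, ?_, ?_⟩
    · refine (PySem.List.mem_combinations_iff _ 5 c).mpr ⟨?_, hl⟩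
      exact sublist_pyRange_of_sorted c 0 _ (hpw.imp (fun h => h.1)) hbound
    · exact (inner_all_iff graph c).mpr (hpw.imp (fun h => h.2))

theorem mem_nbr (graph : List (List Int)) (u b : Int) :
    b ∈ k5Nbr graph u ↔
      u < b ∧ b < (graph.length : Int) ∧ k5E graph u b := by
  unfold k5Nbr
  simp [List.mem_filter, PySem.List.mem_pyRange_one, k5E]
  constructor
  · rintro ⟨⟨h2, h3⟩, h4⟩; exact ⟨by omega, h3, h4⟩
  · rintro ⟨h2, h3, h4⟩; exact ⟨⟨by omega, h3⟩, h4⟩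

theorem extend_iff (graph : List (List Int)) (k : Nat) (cand : List Int) :
    k5Extend graph k cand = true ↔
      ∃ l : List Int, l.length = k ∧ (∀ x ∈ l, x ∈ cand) ∧
        l.Pairwise (fun a b => b ∈ k5Nbr graph a) := by
  induction k generalizing cand with
  | zero =>
    simp [k5Extend]
  | succ k ih =>
    rw [show k5Extend graph (k+1) cand = cand.any (fun v =>
        k5Extend graph k (cand.filter (fun x => (k5Nbr graph v).contains x))) from rfl]
    rw [List.any_eq_true]
    constructor
    · rintro ⟨v, hv, hext⟩
      obtain ⟨l, hlen, hsub, hpw⟩ := (ih _).mp hext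
      refine ⟨v :: l, by simp [hlen], ?_, ?_⟩
      · intro x hx
        rcases List.mem_cons.mp hx with rfl | hx
        · exact hv
        · exact (List.mem_filter.mp (hsub x hx)).1
      · refine List.pairwise_cons.mpr ⟨?_, hpw⟩
        intro b hb
        have := (List.mem_filter.mp (hsub b hb)).2
        simpa using this
    · rintro ⟨l, hlen, hsub, hpw⟩
      match l, hlen with
      | v :: l, hlen =>
        obtain ⟨hhead, hpw'⟩ := List.pairwise_cons.mp hpw
        refine ⟨v, hsub v List.mem_cons_self, (ih _).mpr ⟨l, by simpa using hlen, ?_, hpw'⟩⟩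
        intro x hx
        refine List.mem_filter.mpr ⟨hsub x (List.mem_cons_of_mem _ hx), by simpa using hhead x hx⟩

theorem clique5_five_le (graph : List (List Int)) (h : Clique5 graph) :
    5 ≤ graph.length := by
  obtain ⟨c, hl, hbound, hpw⟩ := h
  have hs := sublist_pyRange_of_sorted c 0 (graph.length : Int) (hpw.imp (fun h => h.1)) hbound
  have := hs.length_le
  simp [PySem.List.length_pyRange_one, hl] at this
  omega

theorem ifK5_alt_iff_clique (graph : List (List Int)) :
    ifK5_alt graph = true ↔ Clique5 graph := by
  unfold ifK5_alt
  by_cases hn : graph.length < 5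
  · simp [hn]
    intro h; exact absurd (clique5_five_le graph h) (by omega)
  · simp only [hn, if_false]
    unfold Clique5
    rw [List.any_eq_true]
    constructor
    · rintro ⟨u, hu, hext⟩
      rw [PySem.List.mem_pyRange_one] at hu
      obtain ⟨l, hlen, hsub, hpw⟩ := (extend_iff _ 4 _).mp hext
      have hbl : ∀ x ∈ l, u < x ∧ x < (graph.length : Int) ∧ k5E graph u x := by
        intro x hx
        exact (mem_nbr graph u x).mp (hsub x hx)
      refine ⟨u :: l, by simp [hlen], ?_, ?_⟩
      · intro x hx
        rcases List.mem_cons.mp hx with rfl | hx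
        · exact hu
        · have := hbl x hx; constructor <;> omega
      · refine List.pairwise_cons.mpr ⟨fun b hb => ⟨(hbl b hb).1, (hbl b hb).2.2⟩, ?_⟩
        refine hpw.imp_of_mem (fun {a b} ha hb hr => ?_)
        have h1 := hbl a ha
        exact ((mem_nbr graph a b).mp hr).imp_right (fun h => h.2)
    · rintro ⟨c, hlen, hbound, hpw⟩
      match c, hlen with
      | u :: l, hlen =>
        have hu := hbound u List.mem_cons_self
        obtain ⟨hhead, hpw'⟩ := List.pairwise_cons.mp hpw
        refine ⟨u, PySem.List.mem_pyRange_one.mpr hu, (extend_iff _ 4 _).mpr ⟨l, by simpa using hlen, ?_, ?_⟩⟩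
        · intro x hx
          have hb := hbound x (List.mem_cons_of_mem _ hx)
          exact (mem_nbr graph u x).mpr ⟨(hhead x hx).1, hb.2, (hhead x hx).2⟩
        · refine hpw'.imp_of_mem (fun {a b} ha hb hr => ?_)
          have hba := hbound a (List.mem_cons_of_mem _ ha)
          have hbb := hbound b (List.mem_cons_of_mem _ hb)
          exact (mem_nbr graph a b).mpr ⟨hr.1, hbb.2, hr.2⟩

-- ===== VERDICT (by name: the statement is the Claim_ definition above) =====
theorem ifK5_spec : Claim_equal_ifK5 := by
  intro graph _ _
  unfold Spec_ifK5
  have h := (ifK5_iff_clique graph).trans (ifK5_alt_iff_clique graph).symm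
  cases ha : ifK5 graph <;> cases hb : ifK5_alt graph <;> simp_all
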